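-- pv_equiv track=rewrite | github.com/yashhR/competitive | Code Arena/commonSubSeq.py | Sub_Sequences
-- ===== SOURCE A (Python) =====
-- import itertools
--
-- def no_vowels(some):
--     for c in some:
--         if c in 'aeiouAEIOU':
--             return False
--     return True
--
-- def Sub_Sequences(STR):
--     combs = []
--     ret = []
--     for l in range(1, len(STR)+1):
--         combs.append(list(itertools.combinations(STR, l)))
--     for each in combs:
--         for i in range(len(each)):
--             if no_vowels(each[i]):
--                 each[i] = ''.join(each[i])
--                 ret.append(each[i])
--     return ret
-- ===== SOURCE B (Python) =====
-- import itertools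
--
-- def Sub_Sequences(STR):
--     cons = [c for c in STR if c not in 'aeiouAEIOU']
--     ret = []
--     for l in range(1, len(cons) + 1):
--         for t in itertools.combinations(cons, l):
--             ret.append(''.join(t))
--     return ret
-- ===== Notes on version B (the rewrite author's own statement) =====
-- stated objective: faster
-- what changed: B filters the vowels out once and enumerates combinations only of the consonant characters, instead of generating all 2^n subsequences of the whole string and filtering each one for vowels.
import Mathlib
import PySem

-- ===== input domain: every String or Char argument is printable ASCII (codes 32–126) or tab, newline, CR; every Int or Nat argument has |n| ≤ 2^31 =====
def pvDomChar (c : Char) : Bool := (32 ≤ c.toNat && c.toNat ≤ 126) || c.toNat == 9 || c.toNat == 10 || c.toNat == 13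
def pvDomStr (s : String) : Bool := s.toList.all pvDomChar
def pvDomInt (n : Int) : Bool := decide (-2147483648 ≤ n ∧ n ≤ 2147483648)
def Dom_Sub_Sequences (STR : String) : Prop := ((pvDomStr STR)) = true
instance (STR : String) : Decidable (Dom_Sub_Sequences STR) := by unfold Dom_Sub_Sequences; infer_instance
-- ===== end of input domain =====

-- B filters the vowels out once and enumerates combinations of the consonants only,
-- instead of enumerating all subsequences of the whole string and filtering; faster (asymptotic).

-- itertools.combinations(xs, l) in itertools' order (shared by both ports, as both Pythons call it)
def pvCombs (l : Nat) (xs : List Char) : List (List Char) :=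
  match l, xs with
  | 0, _ => [[]]
  | _ + 1, [] => []
  | l + 1, c :: rest => (pvCombs l rest).map (fun t => c :: t) ++ pvCombs (l + 1) rest

-- ===== PORT A =====
-- c in 'aeiouAEIOU'
def pvIsVowel (c : Char) : Bool := "aeiouAEIOU".toList.contains c

-- no_vowels: early-return loop → structural recursion
def pvNoVowels : List Char → Bool
  | [] => true
  | c :: rest => if pvIsVowel c then false else pvNoVowels rest

def Sub_Sequences (STR : String) : List String :=
  let s := STR.toList
  -- combs.append(list(itertools.combinations(STR, l))) for l in range(1, len(STR)+1)
  let combs := (List.range' 1 s.length).foldl (fun combs l => combs ++ [pvCombs l s]) []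
  -- nested loop: for each in combs: for i in range(len(each)): if no_vowels: append ''.join
  combs.foldl (fun ret each =>
    each.foldl (fun ret t => if pvNoVowels t then ret ++ [String.mk t] else ret) ret) []

-- ===== PORT B =====
def Sub_Sequences_alt (STR : String) : List String :=
  -- cons = [c for c in STR if c not in 'aeiouAEIOU']
  let cons := STR.toList.filter (fun c => !pvIsVowel c)
  -- for l in range(1, len(cons)+1): for t in combinations(cons, l): ret.append(''.join(t))
  (List.range' 1 cons.length).foldl (fun ret l =>
    (pvCombs l cons).foldl (fun ret t => ret ++ [String.mk t]) ret) []

-- ===== PRECONDITION & SPEC =====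
def Spec_Sub_Sequences (STR : String) (out : List String) : Prop := out = Sub_Sequences_alt STR
instance (STR : String) (out : List String) : Decidable (Spec_Sub_Sequences STR out) := by unfold Spec_Sub_Sequences; infer_instance

-- ===== CLAIM (what is proved, stated in full; the proofs are below) =====
def Claim_equal_Sub_Sequences : Prop := ∀ (STR : String), Dom_Sub_Sequences STR → Spec_Sub_Sequences STR (Sub_Sequences STR)

-- ===== LEMMAS AND PROOFS =====

theorem pv_foldl_app_singleton {α β : Type} (f : α → β) :
    ∀ (L : List α) (acc : List β), L.foldl (fun a x => a ++ [f x]) acc = acc ++ L.map f := by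
  intro L
  induction L with
  | nil => intro acc; simp
  | cons x xs ih => intro acc; simp [List.foldl, ih]

theorem pv_foldl_filter_app (p : List Char → Bool) :
    ∀ (L : List (List Char)) (acc : List String),
      L.foldl (fun r t => if p t then r ++ [String.mk t] else r) acc
        = acc ++ (L.filter p).map String.mk := by
  intro L
  induction L with
  | nil => intro acc; simp
  | cons t ts ih =>
    intro acc
    by_cases h : p t = true
    · simp [List.foldl, h, ih]
    · simp at h
      simp [List.foldl, h, ih]

theorem pv_A_fold :
    ∀ (combs : List (List (List Char))) (acc : List String),
      combs.foldl (fun ret each =>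
          each.foldl (fun r t => if pvNoVowels t then r ++ [String.mk t] else r) ret) acc
        = acc ++ (combs.map (fun each => (each.filter pvNoVowels).map String.mk)).flatten := by
  intro combs
  induction combs with
  | nil => intro acc; simp
  | cons e es ih =>
    intro acc
    simp only [List.foldl, List.map, List.flatten]
    rw [pv_foldl_filter_app, ih, List.append_assoc]; rfl

theorem pv_B_fold (cons : List Char) :
    ∀ (L : List Nat) (acc : List String),
      L.foldl (fun ret l => (pvCombs l cons).foldl (fun r t => r ++ [String.mk t]) ret) acc
        = acc ++ (L.map (fun l => (pvCombs l cons).map String.mk)).flatten := by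
  intro L
  induction L with
  | nil => intro acc; simp
  | cons l ls ih =>
    intro acc
    simp only [List.foldl, List.map, List.flatten]
    rw [pv_foldl_app_singleton, ih, List.append_assoc]; rfl

-- filtering combinations for vowel-freedom = combinations of the vowel-filtered list
theorem pv_filter_combs :
    ∀ (xs : List Char) (l : Nat),
      (pvCombs l xs).filter pvNoVowels = pvCombs l (xs.filter (fun c => !pvIsVowel c)) := by
  intro xs
  induction xs with
  | nil =>
    intro l
    cases l with
    | zero => simp [pvCombs, pvNoVowels]
    | succ l => simp [pvCombs]
  | cons c rest ih =>
    intro l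
    cases l with
    | zero => simp [pvCombs, pvNoVowels]
    | succ l =>
      simp only [pvCombs, List.filter_append, List.filter_map]
      by_cases h : pvIsVowel c = true
      · have hmap : (pvCombs l rest).filter (pvNoVowels ∘ fun t => c :: t) = [] := by
          apply List.filter_eq_nil_iff.mpr
          intro t _
          simp [Function.comp, pvNoVowels, h]
        rw [hmap]
        simp [List.filter_cons, h, ih]
      · simp only [Bool.not_eq_true] at h
        have hmap : (pvCombs l rest).filter (pvNoVowels ∘ fun t => c :: t)
            = (pvCombs l rest).filter pvNoVowels := by
          apply List.filter_congr
          intro t _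
          simp [Function.comp, pvNoVowels, h]
        rw [hmap, ih l, ih (l + 1)]
        simp [List.filter_cons, h, pvCombs]

-- combinations longer than the list are empty
theorem pv_combs_long :
    ∀ (xs : List Char) (l : Nat), xs.length < l → pvCombs l xs = [] := by
  intro xs
  induction xs with
  | nil =>
    intro l hl
    cases l with
    | zero => omega
    | succ l => rfl
  | cons c rest ih =>
    intro l hl
    cases l with
    | zero => omega
    | succ l =>
      simp only [pvCombs]
      rw [ih l (by simp at hl; omega), ih (l + 1) (by simp at hl; omega)]
      simp

theorem Sub_Sequences_eq (STR : String) : Sub_Sequences STR = Sub_Sequences_alt STR := by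
  unfold Sub_Sequences Sub_Sequences_alt
  simp only
  rw [pv_foldl_app_singleton, List.nil_append, pv_A_fold, pv_B_fold, List.nil_append,
    List.nil_append, List.map_map]
  set s := STR.toList with hs
  set cons := s.filter (fun c => !pvIsVowel c) with hcons
  have hk : cons.length ≤ s.length := List.length_filter_le _ _
  have hsplit : List.range' 1 s.length
      = List.range' 1 cons.length ++ List.range' (1 + cons.length) (s.length - cons.length) := by
    have h := @List.range'_append 1 cons.length (s.length - cons.length) 1
    simp only [Nat.one_mul] at h
    have h2 : cons.length + (s.length - cons.length) = s.length := by omega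
    rw [h2] at h
    exact h.symm
  rw [hsplit, List.map_append, List.flatten_append]
  have hF : ∀ l, ((fun each => (each.filter pvNoVowels).map String.mk) ∘ fun l => pvCombs l s) l
      = (pvCombs l cons).map String.mk := by
    intro l
    simp only [Function.comp]
    rw [pv_filter_combs, ← hcons]
  have htail : ((List.range' (1 + cons.length) (s.length - cons.length)).map
      ((fun each => (each.filter pvNoVowels).map String.mk) ∘ fun l => pvCombs l s)).flatten = [] := by
    apply List.flatten_eq_nil_iff.mpr
    intro ys hys
    rw [List.mem_map] at hys
    obtain ⟨l, hl, rfl⟩ := hys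
    rw [List.mem_range'] at hl
    obtain ⟨i, _, rfl⟩ := hl
    rw [hF, pv_combs_long cons _ (by omega)]
    rfl
  rw [htail, List.append_nil]
  congr 1
  apply List.map_congr_left
  intro l _
  exact hF l

-- ===== VERDICT (by name: the statement is the Claim_ definition above) =====
theorem Sub_Sequences_spec : Claim_equal_Sub_Sequences := by
  intro STR _
  unfold Spec_Sub_Sequences
  exact Sub_Sequences_eq STR
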